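-- pv_equiv track=rewrite | github.com/RuyiLi/cs444 | src/main.py | perform_register_allocation
-- ===== SOURCE A (Python) =====
-- def perform_register_allocation(instructions):
--     active_intervals = []
--     register_map = {}
--     register_pool = ["eax", "ebx", "ecx", "edx"]
--
--     for index, (instruction, operands) in enumerate(instructions):
--         for operand in operands.split(","):
--             operand = operand.strip()
--             if operand in register_map:
--                 active_intervals[register_map[operand]][2] = index
--             else:
--                 active_intervals.append((operand, index, index))
--
--     active_intervals.sort(key=lambda x: x[1])
--
--     for interval in active_intervals:
--         variable = interval[0]
--         start_index = interval[1]
--         end_index = interval[2]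
--
--         if variable not in register_map:
--             if register_pool:
--                 register_map[variable] = register_pool.pop(0)
--             else:
--                 register_map[variable] = "memory_location"  # How do I map to a memory location????
--
--     return register_map
-- ===== SOURCE B (Python) =====
-- def perform_register_allocation(instructions):
--     # Single pass: first time an operand is seen, assign the next register
--     # from the pool (then 'memory_location'). No interval list, no sort.
--     register_map = {}
--     pool = ["eax", "ebx", "ecx", "edx"]
--     for _, operands in instructions:
--         for operand in operands.split(","):
--             operand = operand.strip()
--             if operand not in register_map:
--                 register_map[operand] = pool.pop(0) if pool else "memory_location"
--     return register_map
-- ===== Notes on version B (the rewrite author's own statement) =====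
-- stated objective: simpler
-- what changed: B assigns registers in a single pass at first appearance of each operand, dropping A's interval list, its dead in-register_map update branch and the stable sort (which is a no-op because interval start indices are produced in nondecreasing order).
import Mathlib
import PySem

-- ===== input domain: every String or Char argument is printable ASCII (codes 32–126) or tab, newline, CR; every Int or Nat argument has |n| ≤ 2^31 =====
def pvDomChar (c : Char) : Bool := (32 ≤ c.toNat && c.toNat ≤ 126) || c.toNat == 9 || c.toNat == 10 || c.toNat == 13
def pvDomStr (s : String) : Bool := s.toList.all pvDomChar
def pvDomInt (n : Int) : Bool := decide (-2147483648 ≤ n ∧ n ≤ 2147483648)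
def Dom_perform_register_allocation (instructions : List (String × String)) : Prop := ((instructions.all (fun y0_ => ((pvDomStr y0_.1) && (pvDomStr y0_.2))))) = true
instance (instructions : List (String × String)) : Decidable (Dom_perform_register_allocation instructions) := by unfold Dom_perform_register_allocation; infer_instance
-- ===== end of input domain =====

-- B is a single first-appearance pass; A's interval list, dead update branch and stable sort are dropped (objective: simpler).
-- ===== PORT A =====
def perform_register_allocation (instructions : List (String × String)) : List (String × String) :=
  -- register_map = {} ; it is only READ inside the first loop (never written there), so it is rm0 below
  let rm0 : PySem.Dict String String := PySem.Dict.empty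
  -- first loop: for index, (instruction, operands) in enumerate(instructions): for operand in operands.split(","):
  let active_intervals : List (String × Int × Int) :=
    (PySem.List.enumerate instructions).foldl (fun ai p =>
      ((PySem.Str.split? p.2.2 ",").getD []).foldl (fun ai operand =>
        let operand := PySem.Str.strip operand
        if rm0.contains operand then
          ai  -- unreachable: register_map is empty throughout this loop; Python would raise TypeError here
        else
          ai ++ [(operand, p.1, p.1)]) ai) []
  -- active_intervals.sort(key=lambda x: x[1])
  let active_intervals := PySem.List.sorted active_intervals (fun x => x.2.1) false
  -- second loop: assign a register to each interval's variable first seen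
  let st := active_intervals.foldl (fun (st : PySem.Dict String String × List String) interval =>
      let var := interval.1
      if st.1.contains var then st
      else match st.2 with
        | [] => (st.1.insert var "memory_location", [])
        | r :: rest => (st.1.insert var r, rest))   -- register_pool.pop(0)
    (rm0, ["eax", "ebx", "ecx", "edx"])
  st.1.items

-- ===== PORT B =====
def pra_step (st : PySem.Dict String String × List String) (operand : String) :
    PySem.Dict String String × List String :=
  let operand := PySem.Str.strip operand
  if st.1.contains operand then st
  else match st.2 with
    | [] => (st.1.insert operand "memory_location", [])
    | r :: rest => (st.1.insert operand r, rest)       -- pool.pop(0) if pool else "memory_location"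

def perform_register_allocation_alt (instructions : List (String × String)) : List (String × String) :=
  let st := instructions.foldl (fun st inst =>
      ((PySem.Str.split? inst.2 ",").getD []).foldl pra_step st)
    (PySem.Dict.empty, ["eax", "ebx", "ecx", "edx"])
  st.1.items

-- ===== PRECONDITION & SPEC =====
def Spec_perform_register_allocation (instructions : List (String × String)) (out : List (String × String)) : Prop := out = perform_register_allocation_alt instructions
instance (instructions : List (String × String)) (out : List (String × String)) : Decidable (Spec_perform_register_allocation instructions out) := by unfold Spec_perform_register_allocation; infer_instance

-- ===== CLAIM (what is proved, stated in full; the proofs are below) =====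
def Claim_equal_perform_register_allocation : Prop := ∀ (instructions : List (String × String)), Dom_perform_register_allocation instructions → Spec_perform_register_allocation instructions (perform_register_allocation instructions)

-- ===== LEMMAS AND PROOFS =====

-- the stripped operand occurrences of one instruction, tagged with its index i as a (var, i, i) interval
def pra_chunk (i : Int) (p : String × String) : List (String × Int × Int) :=
  ((PySem.Str.split? p.2 ",").getD []).map (fun op => (PySem.Str.strip op, i, i))

-- A's first loop builds exactly the tagged occurrence list, in enumeration order
theorem pra_loop1_eq (instructions : List (String × String)) :
    ((PySem.List.enumerate instructions).foldl (fun ai p =>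
      ((PySem.Str.split? p.2.2 ",").getD []).foldl (fun ai operand =>
        let operand := PySem.Str.strip operand
        if (PySem.Dict.empty : PySem.Dict String String).contains operand then ai
        else ai ++ [(operand, p.1, p.1)]) ai) [])
    = (PySem.List.enumerate instructions).flatMap (fun p => pra_chunk p.1 p.2) := by
  have h : ∀ (p : Int × String × String) (ai : List (String × Int × Int)),
      ((PySem.Str.split? p.2.2 ",").getD []).foldl (fun ai operand =>
        let operand := PySem.Str.strip operand
        if (PySem.Dict.empty : PySem.Dict String String).contains operand then ai
        else ai ++ [(operand, p.1, p.1)]) ai = ai ++ pra_chunk p.1 p.2 := by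
    intro p ai
    simp only [PySem.Dict.contains_empty, Bool.false_eq_true, if_false, pra_chunk]
    exact PySem.List.foldl_append_singleton_eq_map _ _ _
  calc ((PySem.List.enumerate instructions).foldl (fun ai p =>
          ((PySem.Str.split? p.2.2 ",").getD []).foldl (fun ai operand =>
            let operand := PySem.Str.strip operand
            if (PySem.Dict.empty : PySem.Dict String String).contains operand then ai
            else ai ++ [(operand, p.1, p.1)]) ai) [])
      = (PySem.List.enumerate instructions).foldl
          (fun ai p => ai ++ pra_chunk p.1 p.2) [] := by
        simp only [h]
    _ = _ := by
        simpa using PySem.List.foldl_append_eq_flatMap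
          (fun p : Int × String × String => pra_chunk p.1 p.2) _ []

-- every start index in the tagged occurrence list is at least the enumeration start
theorem pra_mem_ge (instructions : List (String × String)) (s : Int)
    (b : String × Int × Int)
    (hb : b ∈ (PySem.List.enumerate instructions s).flatMap (fun p => pra_chunk p.1 p.2)) :
    s ≤ b.2.1 := by
  induction instructions generalizing s with
  | nil => simp [PySem.List.enumerate_nil] at hb
  | cons x xs ih =>
    rw [PySem.List.enumerate_cons] at hb
    simp only [List.flatMap_cons, List.mem_append] at hb
    rcases hb with hb | hb
    · simp only [pra_chunk, List.mem_map] at hb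
      obtain ⟨op, -, rfl⟩ := hb
      exact le_refl s
    · have := ih (s + 1) hb
      omega

-- the tagged occurrence list is already nondecreasing in its start index, so A's stable sort is the identity
theorem pra_pairwise (instructions : List (String × String)) (s : Int) :
    ((PySem.List.enumerate instructions s).flatMap (fun p => pra_chunk p.1 p.2)).Pairwise
      (fun a b => a.2.1 ≤ b.2.1) := by
  induction instructions generalizing s with
  | nil => simp [PySem.List.enumerate_nil]
  | cons x xs ih =>
    rw [PySem.List.enumerate_cons]
    simp only [List.flatMap_cons]
    rw [List.pairwise_append]
    refine ⟨?_, ih (s + 1), ?_⟩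
    · simp only [pra_chunk]
      rw [List.pairwise_map]
      exact List.pairwise_iff_forall_sublist.2 (fun _ => le_refl s)
    · intro a ha b hb
      simp only [pra_chunk, List.mem_map] at ha
      obtain ⟨op, -, rfl⟩ := ha
      have := pra_mem_ge xs (s + 1) b hb
      simpa using by omega

-- A's second loop over the tagged list is B's fused single pass over the raw comma pieces
theorem pra_fold2 (instructions : List (String × String)) (s : Int)
    (st : PySem.Dict String String × List String) :
    ((PySem.List.enumerate instructions s).flatMap (fun p => pra_chunk p.1 p.2)).foldl
      (fun (st : PySem.Dict String String × List String) interval =>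
        let var := interval.1
        if st.1.contains var then st
        else match st.2 with
          | [] => (st.1.insert var "memory_location", [])
          | r :: rest => (st.1.insert var r, rest)) st
    = instructions.foldl (fun st inst =>
        ((PySem.Str.split? inst.2 ",").getD []).foldl pra_step st) st := by
  induction instructions generalizing s st with
  | nil => simp [PySem.List.enumerate_nil]
  | cons x xs ih =>
    rw [PySem.List.enumerate_cons]
    simp only [List.flatMap_cons, List.foldl_append, List.foldl_cons]
    rw [← ih (s + 1)]
    congr 1
    simp only [pra_chunk, List.foldl_map]
    rfl

-- ===== VERDICT (by name: the statement is the Claim_ definition above) =====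
theorem perform_register_allocation_spec : Claim_equal_perform_register_allocation := by
  intro instructions _
  unfold Spec_perform_register_allocation perform_register_allocation perform_register_allocation_alt
  simp only []
  rw [pra_loop1_eq,
      PySem.List.sorted_eq_self_of_pairwise _ _ (pra_pairwise instructions 0),
      pra_fold2 instructions 0]
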